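-- pv_equiv track=rewrite | github.com/MaratLaischev/grocery_store | api/cart/views.py | get_grand_total_and_total_items
-- ===== SOURCE A (Python) =====
-- def get_grand_total_and_total_items(
--     products: list
-- ) -> tuple[int, int]:
--     '''
--     Получает список продуктов и выводит общюю цену и количество позиций
--     '''
--     full_price = 0
--     total_items = 0
--     for product in products:
--         full_price += product['price'] * product['quantity']
--         total_items += product['quantity']
--     return full_price, total_items
-- ===== SOURCE B (Python) =====
-- def get_grand_total_and_total_items(
--     products: list
-- ) -> tuple[int, int]:
--     '''
--     Divide-and-conquer: split the list in halves, combine partial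
--     (price-total, quantity-total) pairs; base cases: empty and singleton.
--     '''
--     def go(chunk):
--         if not chunk:
--             return (0, 0)
--         if len(chunk) == 1:
--             p = chunk[0]
--             return (p['price'] * p['quantity'], p['quantity'])
--         mid = len(chunk) // 2
--         left = go(chunk[:mid])
--         right = go(chunk[mid:])
--         return (left[0] + right[0], left[1] + right[1])
--     return go(products)
-- ===== Notes on version B (the rewrite author's own statement) =====
-- stated objective: alternative
-- what changed: Replaces A's fused left-to-right accumulator loop with a divide-and-conquer recursion that splits the product list in halves and combines partial (price-total, quantity-total) pairs; correct because integer addition is associative and commutative.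
import Mathlib
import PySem

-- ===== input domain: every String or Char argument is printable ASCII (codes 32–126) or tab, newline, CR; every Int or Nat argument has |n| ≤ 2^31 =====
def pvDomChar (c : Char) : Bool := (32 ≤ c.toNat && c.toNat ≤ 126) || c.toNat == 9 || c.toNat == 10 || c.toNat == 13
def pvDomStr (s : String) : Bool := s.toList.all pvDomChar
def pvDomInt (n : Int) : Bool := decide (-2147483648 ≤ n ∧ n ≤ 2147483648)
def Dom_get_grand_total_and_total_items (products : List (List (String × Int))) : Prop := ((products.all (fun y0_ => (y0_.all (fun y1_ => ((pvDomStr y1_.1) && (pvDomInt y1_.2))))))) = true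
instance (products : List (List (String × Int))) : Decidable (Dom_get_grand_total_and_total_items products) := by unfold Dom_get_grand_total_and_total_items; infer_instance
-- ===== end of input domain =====

-- B replaces A's fused left-to-right accumulator loop with a divide-and-conquer
-- recursion over list halves (alternative decomposition; no speed claim).

-- ===== PORT A =====
-- product['k']: under Pre_ the key is present, so Dict.getD's default is never taken
-- (KeyError inputs are excluded by Pre_).
def pyItemA (product : List (String × Int)) (k : String) : Int :=
  (PySem.Dict.mk product).getD k 0

def get_grand_total_and_total_items (products : List (List (String × Int))) : Int × Int :=
  products.foldl
    (fun acc product =>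
      (acc.1 + pyItemA product "price" * pyItemA product "quantity",
       acc.2 + pyItemA product "quantity"))
    (0, 0)

-- ===== PORT B =====
def pyItemB (p : List (String × Int)) (k : String) : Int :=
  (PySem.Dict.mk p).getD k 0

-- go(chunk): empty / singleton base cases, else split at len//2 and combine.
def goB : List (List (String × Int)) → Int × Int
  | [] => (0, 0)
  | [p] => (pyItemB p "price" * pyItemB p "quantity", pyItemB p "quantity")
  | a :: b :: rest =>
      ((goB ((a :: b :: rest).take ((a :: b :: rest).length / 2))).1 +
         (goB ((a :: b :: rest).drop ((a :: b :: rest).length / 2))).1,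
       (goB ((a :: b :: rest).take ((a :: b :: rest).length / 2))).2 +
         (goB ((a :: b :: rest).drop ((a :: b :: rest).length / 2))).2)
termination_by l => l.length
decreasing_by
  · simp only [List.length_take, List.length_cons]; omega
  · simp only [List.length_drop, List.length_cons]; omega

def get_grand_total_and_total_items_alt (products : List (List (String × Int))) : Int × Int :=
  goB products

-- ===== PRECONDITION & SPEC =====
-- Pre_ excludes exactly the inputs where Python A raises KeyError: a product
-- missing the 'price' or 'quantity' key.
def Pre_get_grand_total_and_total_items (products : List (List (String × Int))) : Prop :=
  (products.all (fun p => (PySem.Dict.mk p).contains "price" && (PySem.Dict.mk p).contains "quantity")) = true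
instance (products : List (List (String × Int))) : Decidable (Pre_get_grand_total_and_total_items products) := by
  unfold Pre_get_grand_total_and_total_items; infer_instance

def pvWitness_get_grand_total_and_total_items : (List (List (String × Int))) :=
  [[("price", 3), ("quantity", 2)], [("price", 5), ("quantity", 1)]]

def Spec_get_grand_total_and_total_items (products : List (List (String × Int))) (out : Int × Int) : Prop := out = get_grand_total_and_total_items_alt products
instance (products : List (List (String × Int))) (out : Int × Int) : Decidable (Spec_get_grand_total_and_total_items products out) := by unfold Spec_get_grand_total_and_total_items; infer_instance

-- ===== CLAIM (what is proved, stated in full; the proofs are below) =====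
def Claim_equal_get_grand_total_and_total_items : Prop := ∀ (products : List (List (String × Int))), Dom_get_grand_total_and_total_items products → Pre_get_grand_total_and_total_items products → Spec_get_grand_total_and_total_items products (get_grand_total_and_total_items products)

-- ===== LEMMAS AND PROOFS =====
-- Both programs compute (Σ price·qty, Σ qty); we prove each equal to that pair.
lemma goB_eq (l : List (List (String × Int))) :
    goB l = ((l.map (fun p => pyItemB p "price" * pyItemB p "quantity")).sum,
             (l.map (fun p => pyItemB p "quantity")).sum) := by
  fun_induction goB l with
  | case1 => rfl
  | case2 p => simp
  | case3 a b rest ih1 ih2 =>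
      simp only [ih1, ih2]
      conv_rhs => rw [← List.take_append_drop ((a :: b :: rest).length / 2) (a :: b :: rest)]
      simp

lemma foldA_eq (products : List (List (String × Int))) (a b : Int) :
    products.foldl
      (fun acc product =>
        (acc.1 + pyItemA product "price" * pyItemA product "quantity",
         acc.2 + pyItemA product "quantity"))
      (a, b)
    = (a + (products.map (fun p => pyItemB p "price" * pyItemB p "quantity")).sum,
       b + (products.map (fun p => pyItemB p "quantity")).sum) := by
  induction products generalizing a b with
  | nil => simp
  | cons p rest ih =>
      simp only [List.foldl, List.map, List.sum_cons]
      rw [ih]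
      simp only [pyItemA, pyItemB, Prod.mk.injEq]
      constructor <;> ring

-- ===== VERDICT (by name: the statement is the Claim_ definition above) =====
theorem get_grand_total_and_total_items_spec : Claim_equal_get_grand_total_and_total_items := by
  intro products _ _
  unfold Spec_get_grand_total_and_total_items get_grand_total_and_total_items get_grand_total_and_total_items_alt
  rw [foldA_eq, goB_eq]
  simp
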